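-- pv_equiv track=rewrite | github.com/AibekMinbaev/algorithms | codeforces/contests/1905b.py | dfs
-- ===== SOURCE A (Python) =====
-- def dfs(d, key, seen, cnt):
--     for elem in d[key]:
--         if elem not in d:
--             cnt += 1
--         else:
--             seen.add(elem)
--             cnt += dfs(d, elem, seen, 0)
--     return cnt
-- ===== SOURCE B (Python) =====
-- def dfs(d, key, seen, cnt):
--     stack = [key]
--     while stack:
--         k = stack.pop()
--         for elem in d[k]:
--             if elem not in d:
--                 cnt += 1
--             else:
--                 seen.add(elem)
--                 stack.append(elem)
--     return cnt
-- ===== Notes on version B (the rewrite author's own statement) =====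
-- stated objective: alternative
-- what changed: Replaces A's recursive DFS (one call per internal node, counts returned up the call chain) by an iterative DFS with an explicit stack and a single running counter; no visited-skip is added, so repeated/cyclic edges behave identically.
import Mathlib
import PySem

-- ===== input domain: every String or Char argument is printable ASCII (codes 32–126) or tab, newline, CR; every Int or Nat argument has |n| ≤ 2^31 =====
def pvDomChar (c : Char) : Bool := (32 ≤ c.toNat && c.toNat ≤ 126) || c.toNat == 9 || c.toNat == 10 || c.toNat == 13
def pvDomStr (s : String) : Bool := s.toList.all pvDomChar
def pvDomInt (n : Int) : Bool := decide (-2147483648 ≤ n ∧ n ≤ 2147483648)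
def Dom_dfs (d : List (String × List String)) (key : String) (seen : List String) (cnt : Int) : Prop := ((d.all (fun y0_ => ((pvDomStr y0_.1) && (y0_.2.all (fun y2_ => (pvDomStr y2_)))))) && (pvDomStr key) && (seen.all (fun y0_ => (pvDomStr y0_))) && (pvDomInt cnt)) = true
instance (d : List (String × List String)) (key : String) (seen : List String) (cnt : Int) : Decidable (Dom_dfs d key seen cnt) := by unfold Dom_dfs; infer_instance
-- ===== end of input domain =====

-- B replaces A's recursion by an iterative DFS with an explicit stack (different decomposition,
-- same cost); both A and B mutate the Python argument `seen` identically in place — the theorems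
-- below are about the RETURN value. The Lean ports are fueled: the fuel is provably large enough
-- on every input admitted by Pre_dfs (where Python A terminates), and is never reached there.

-- ===== PORT A =====
-- A's recursion, fueled (recursion depth on terminating runs is < d.length + 1, see okA_* below);
-- the `none` branch of the match is Python's KeyError, excluded by Pre_dfs.
mutual
def dfsFuelA (d : List (String × List String)) : Nat → String → PySem.Set String → Int → Int
  | 0, _, _, cnt => cnt
  | Nat.succ f, k, seen, cnt =>
    match (PySem.Dict.mk d).get? k with
    | none => cnt
    | some l => dfsLoopA d f l seen cnt
  termination_by f _ _ _ => (f, 0)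

def dfsLoopA (d : List (String × List String)) : Nat → List String → PySem.Set String → Int → Int
  | _, [], _, cnt => cnt
  | f, e :: es, seen, cnt =>
    if (PySem.Dict.mk d).contains e = false then
      dfsLoopA d f es seen (cnt + 1)
    else
      dfsLoopA d f es (PySem.Set.add seen e) (cnt + dfsFuelA d f e (PySem.Set.add seen e) 0)
  termination_by f l _ _ => (f, l.length + 1)
end

def dfs (d : List (String × List String)) (key : String) (seen : List String) (cnt : Int) : Int :=
  dfsFuelA d (d.length + 1) key (PySem.Set.ofList seen) cnt

-- ===== PORT B =====
-- B's inner `for elem in d[k]` loop: counts leaves, adds internal nodes to seen and pushes them.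
def pushLoopB (d : List (String × List String)) :
    List String → List String → PySem.Set String → Int → List String × PySem.Set String × Int
  | [], st, seen, cnt => (st, seen, cnt)
  | e :: es, st, seen, cnt =>
    if (PySem.Dict.mk d).contains e = false then
      pushLoopB d es st seen (cnt + 1)
    else
      pushLoopB d es (e :: st) (PySem.Set.add seen e) cnt

-- B's `while stack:` loop, fueled (the fuel chosen in dfs_alt is provably enough under Pre_dfs);
-- the `none` branch is Python's KeyError, only reachable when the initial key is absent (excluded by Pre_dfs).
def loopB (d : List (String × List String)) : Nat → List String → PySem.Set String → Int → Int
  | 0, _, _, cnt => cnt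
  | _ + 1, [], _, cnt => cnt
  | g + 1, k :: st, seen, cnt =>
    match (PySem.Dict.mk d).get? k with
    | none => cnt
    | some l =>
      let r := pushLoopB d l st seen cnt
      loopB d g r.1 r.2.1 r.2.2

def dfs_alt (d : List (String × List String)) (key : String) (seen : List String) (cnt : Int) : Int :=
  loopB d (((d.map (fun p => p.2.length)).sum + 1) ^ (d.length + 1)) [key] (PySem.Set.ofList seen) cnt

-- ===== PRECONDITION & SPEC =====
-- One peeling round: adds every key of d all of whose dict-valued successors are already peeled.
def peelStep (d : List (String × List String)) (R : List String) : List String :=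
  d.foldl
    (fun acc p =>
      if p.1 ∈ acc then acc
      else if p.2.all (fun e => (!(PySem.Dict.mk d).contains e) || decide (e ∈ R)) then acc ++ [p.1]
      else acc)
    R

def iterPeel (d : List (String × List String)) : Nat → List String
  | 0 => []
  | n + 1 => peelStep d (iterPeel d n)

-- Pre_dfs holds exactly where Python A returns: keys are distinct (always true for a Python dict),
-- and `key` is peeled within d.length rounds — i.e. key is a key of d and no cycle is reachable
-- from it, which is precisely where A's recursion terminates with no KeyError.
def Pre_dfs (d : List (String × List String)) (key : String) (seen : List String) (cnt : Int) : Prop :=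
  (d.map Prod.fst).Nodup ∧ key ∈ iterPeel d d.length

instance (d : List (String × List String)) (key : String) (seen : List String) (cnt : Int) : Decidable (Pre_dfs d key seen cnt) := by unfold Pre_dfs; infer_instance

def pvWitness_dfs : (List (String × List String)) × String × List String × Int :=
  ([("a", ["b", "x"]), ("b", [])], "a", [], 0)

def Spec_dfs (d : List (String × List String)) (key : String) (seen : List String) (cnt : Int) (out : Int) : Prop := out = dfs_alt d key seen cnt
instance (d : List (String × List String)) (key : String) (seen : List String) (cnt : Int) (out : Int) : Decidable (Spec_dfs d key seen cnt out) := by unfold Spec_dfs; infer_instance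

-- ===== CLAIM (what is proved, stated in full; the proofs are below) =====
def Claim_equal_dfs : Prop := ∀ (d : List (String × List String)) (key : String) (seen : List String) (cnt : Int), Dom_dfs d key seen cnt → Pre_dfs d key seen cnt → Spec_dfs d key seen cnt (dfs d key seen cnt)

-- ===== LEMMAS AND PROOFS =====

-- `okA d f k` : fuel f is enough for A's recursion started at k (false on fuel 0).
def okA (d : List (String × List String)) : Nat → String → Bool
  | 0, _ => false
  | f + 1, k => (((PySem.Dict.mk d).get? k).getD []).all (fun e => okA d f e)

-- `needA d f k` : number of stack pops B performs for the subtree at k (when fuel is enough).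
def needA (d : List (String × List String)) : Nat → String → Nat
  | 0, _ => 0
  | f + 1, k => 1 + (((((PySem.Dict.mk d).get? k).getD []).filter
      (fun e => (PySem.Dict.mk d).contains e)).map (needA d f)).sum

theorem okA_succ (d : List (String × List String)) (f : Nat) (k : String) :
    okA d (f + 1) k = (((PySem.Dict.mk d).get? k).getD []).all (fun e => okA d f e) := rfl

theorem needA_succ (d : List (String × List String)) (f : Nat) (k : String) :
    needA d (f + 1) k = 1 + (((((PySem.Dict.mk d).get? k).getD []).filter
      (fun e => (PySem.Dict.mk d).contains e)).map (needA d f)).sum := rfl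

theorem okA_mono (d : List (String × List String)) :
    ∀ f k, okA d f k = true → okA d (f + 1) k = true := by
  intro f
  induction f with
  | zero => intro k h; simp [okA] at h
  | succ f ih =>
    intro k h
    rw [okA_succ] at h ⊢
    simp only [List.all_eq_true] at h ⊢
    intro e he
    exact ih e (h e he)

theorem okA_le (d : List (String × List String)) {f F : Nat} (h : f ≤ F) :
    ∀ k, okA d f k = true → okA d F k = true := by
  induction F, h using Nat.le_induction with
  | base => exact fun k h => h
  | succ F _ ih => exact fun k h => okA_mono d F k (ih k h)

theorem addA (d : List (String × List String)) :
    ∀ f, (∀ k s s' c, dfsFuelA d f k s c = c + dfsFuelA d f k s' 0) ∧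
         (∀ l s s' c, dfsLoopA d f l s c = c + dfsLoopA d f l s' 0) := by
  intro f
  induction f using Nat.strong_induction_on with
  | _ f ih =>
    have hfuel : ∀ k s s' c, dfsFuelA d f k s c = c + dfsFuelA d f k s' 0 := by
      intro k s s' c
      cases f with
      | zero => simp [dfsFuelA]
      | succ f' =>
        simp only [dfsFuelA]
        cases hg : (PySem.Dict.mk d).get? k with
        | none => simp
        | some l => exact (ih f' (by omega)).2 l s s' c
    refine ⟨hfuel, ?_⟩
    intro l
    induction l with
    | nil => intro s s' c; simp [dfsLoopA]
    | cons e es ihl =>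
      intro s s' c
      simp only [dfsLoopA]
      by_cases hc : (PySem.Dict.mk d).contains e = false
      · rw [if_pos hc, if_pos hc, ihl s PySem.Set.empty (c + 1),
          ihl s' PySem.Set.empty (0 + 1)]
        omega
      · rw [if_neg hc, if_neg hc,
          ihl (PySem.Set.add s e) PySem.Set.empty _,
          ihl (PySem.Set.add s' e) PySem.Set.empty _,
          hfuel e (PySem.Set.add s e) PySem.Set.empty 0,
          hfuel e (PySem.Set.add s' e) PySem.Set.empty 0]
        omega

theorem stepA (d : List (String × List String)) :
    ∀ f, (∀ k s c, okA d f k = true → dfsFuelA d f k s c = dfsFuelA d (f + 1) k s c) ∧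
         (∀ l s c, (∀ e ∈ l, okA d f e = true) → dfsLoopA d f l s c = dfsLoopA d (f + 1) l s c) := by
  intro f
  induction f using Nat.strong_induction_on with
  | _ f ih =>
    have hfuel : ∀ k s c, okA d f k = true → dfsFuelA d f k s c = dfsFuelA d (f + 1) k s c := by
      intro k s c hok
      cases f with
      | zero => simp [okA] at hok
      | succ f' =>
        simp only [dfsFuelA]
        cases hg : (PySem.Dict.mk d).get? k with
        | none => rfl
        | some l =>
          rw [okA_succ, hg] at hok
          simp only [Option.getD_some, List.all_eq_true] at hok
          exact (ih f' (by omega)).2 l s c hok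
    refine ⟨hfuel, ?_⟩
    intro l
    induction l with
    | nil => intro s c _; simp [dfsLoopA]
    | cons e es ihl =>
      intro s c hall
      simp only [dfsLoopA]
      by_cases hc : (PySem.Dict.mk d).contains e = false
      · rw [if_pos hc, if_pos hc]
        exact ihl s (c + 1) (fun x hx => hall x (List.mem_cons_of_mem e hx))
      · rw [if_neg hc, if_neg hc,
          hfuel e (PySem.Set.add s e) 0 (hall e (List.mem_cons_self))]
        exact ihl _ _ (fun x hx => hall x (List.mem_cons_of_mem e hx))

theorem fuelA_ge (d : List (String × List String)) {f F : Nat} (h : f ≤ F) :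
    ∀ k s c, okA d f k = true → dfsFuelA d F k s c = dfsFuelA d f k s c := by
  induction F, h using Nat.le_induction with
  | base => exact fun k s c _ => rfl
  | succ F hle ih =>
    intro k s c hok
    rw [← (stepA d F).1 k s c (okA_le d hle k hok)]
    exact ih k s c hok

theorem need_stab (d : List (String × List String)) :
    ∀ f k, okA d f k = true → needA d (f + 1) k = needA d f k := by
  intro f
  induction f with
  | zero => intro k h; simp [okA] at h
  | succ f ih =>
    intro k h
    rw [okA_succ] at h
    simp only [List.all_eq_true] at h
    rw [needA_succ, needA_succ]
    have : ((((PySem.Dict.mk d).get? k).getD []).filter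
          (fun e => (PySem.Dict.mk d).contains e)).map (needA d (f + 1))
        = ((((PySem.Dict.mk d).get? k).getD []).filter
          (fun e => (PySem.Dict.mk d).contains e)).map (needA d f) :=
      List.map_congr_left (fun e he => ih e (h e (List.mem_of_mem_filter he)))
    rw [this]

theorem need_bound (d : List (String × List String)) :
    ∀ f k, needA d f k ≤ ((d.map (fun p => p.2.length)).sum + 1) ^ f := by
  intro f
  induction f with
  | zero => intro k; simp [needA]
  | succ f ih =>
    intro k
    rw [needA_succ, pow_succ]
    set E := (d.map (fun p => p.2.length)).sum with hE
    set l := ((PySem.Dict.mk d).get? k).getD [] with hl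
    have hlen : l.length ≤ E := by
      cases hg : (PySem.Dict.mk d).get? k with
      | none => simp [hl, hg, hE]
      | some l0 =>
        have hm : (k, l0) ∈ d := PySem.Dict.mem_items_of_get?_eq_some _ hg
        have : l0.length ∈ d.map (fun p => p.2.length) :=
          List.mem_map.2 ⟨(k, l0), hm, rfl⟩
        have := List.single_le_sum (fun x _ => Nat.zero_le x) _ this
        simp [hl, hg]
        omega
    have hsum : (((l.filter (fun e => (PySem.Dict.mk d).contains e)).map (needA d f)).sum : Nat)
        ≤ (l.filter (fun e => (PySem.Dict.mk d).contains e)).length * (E + 1) ^ f := by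
      have := List.sum_le_card_nsmul
        ((l.filter (fun e => (PySem.Dict.mk d).contains e)).map (needA d f)) ((E + 1) ^ f)
        (by
          intro x hx
          obtain ⟨e, _, rfl⟩ := List.mem_map.1 hx
          exact ih e)
      simpa [smul_eq_mul] using this
    have hfl : (l.filter (fun e => (PySem.Dict.mk d).contains e)).length ≤ E :=
      le_trans (List.length_filter_le _ _) hlen
    have hp : 1 ≤ (E + 1) ^ f := Nat.one_le_pow _ _ (by omega)
    have : (l.filter (fun e => (PySem.Dict.mk d).contains e)).length * (E + 1) ^ f
        ≤ E * (E + 1) ^ f := Nat.mul_le_mul_right _ hfl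
    calc 1 + ((l.filter (fun e => (PySem.Dict.mk d).contains e)).map (needA d f)).sum
        ≤ 1 + E * (E + 1) ^ f := by omega
      _ ≤ (E + 1) ^ f + E * (E + 1) ^ f := by omega
      _ = (E + 1) ^ f * (E + 1) := by ring

theorem mem_peelStep (d : List (String × List String)) (R : List String) (x : String)
    (hx : x ∈ peelStep d R) :
    x ∈ R ∨ ∃ l, (x, l) ∈ d ∧ ∀ e ∈ l, (PySem.Dict.mk d).contains e = false ∨ e ∈ R := by
  have aux : ∀ (td : List (String × List String)) (acc : List String),
      x ∈ td.foldl
        (fun acc p =>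
          if p.1 ∈ acc then acc
          else if p.2.all (fun e => (!(PySem.Dict.mk d).contains e) || decide (e ∈ R)) then
            acc ++ [p.1]
          else acc)
        acc →
      x ∈ acc ∨ ∃ l, (x, l) ∈ td ∧ ∀ e ∈ l, (PySem.Dict.mk d).contains e = false ∨ e ∈ R := by
    intro td
    induction td with
    | nil => exact fun acc h => Or.inl h
    | cons p tl ih =>
      intro acc h
      simp only [List.foldl_cons] at h
      rcases ih _ h with h' | ⟨l, hl, hcond⟩
      · by_cases h1 : p.1 ∈ acc
        · rw [if_pos h1] at h'; exact Or.inl h'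
        · rw [if_neg h1] at h'
          by_cases h2 : p.2.all (fun e => (!(PySem.Dict.mk d).contains e) || decide (e ∈ R)) = true
          · rw [if_pos h2] at h'
            rcases List.mem_append.1 h' with h'' | h''
            · exact Or.inl h''
            · right
              refine ⟨p.2, ?_, ?_⟩
              · rw [List.mem_singleton.1 h'']; exact List.mem_cons_self
              · intro e he
                have := (List.all_eq_true.1 h2) e he
                simpa [Bool.or_eq_true, Bool.not_eq_true'] using this
          · rw [if_neg h2] at h'; exact Or.inl h'
      · exact Or.inr ⟨l, List.mem_cons_of_mem _ hl, hcond⟩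
  exact aux d R hx

theorem peel_sub_keys (d : List (String × List String)) :
    ∀ i x, x ∈ iterPeel d i → x ∈ d.map Prod.fst := by
  intro i
  induction i with
  | zero => intro x hx; simp [iterPeel] at hx
  | succ i ih =>
    intro x hx
    rcases mem_peelStep d _ x hx with h | ⟨l, hl, _⟩
    · exact ih x h
    · exact List.mem_map.2 ⟨(x, l), hl, rfl⟩

theorem peel_ok (d : List (String × List String)) (hnd : (d.map Prod.fst).Nodup) :
    ∀ i x, x ∈ iterPeel d i → okA d (i + 1) x = true := by
  intro i
  induction i with
  | zero => intro x hx; simp [iterPeel] at hx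
  | succ i ih =>
    intro x hx
    rcases mem_peelStep d _ x hx with h | ⟨l, hl, hcond⟩
    · exact okA_mono d _ x (ih x h)
    · have hkeys : (PySem.Dict.mk d).keys.Nodup := hnd
      have hg : (PySem.Dict.mk d).get? x = some l :=
        PySem.Dict.get?_of_mem_items _ hl hkeys
      rw [okA_succ, hg]
      simp only [Option.getD_some, List.all_eq_true]
      intro e he
      rcases hcond e he with hleaf | hR
      · rw [okA_succ]
        have : (PySem.Dict.mk d).get? e = none := by
          rcases hge : (PySem.Dict.mk d).get? e with _ | v
          · rfl
          · rw [PySem.Dict.contains_eq_isSome_get?, hge] at hleaf; simp at hleaf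
        simp [this]
      · exact ih e hR

theorem pushLoopB_stack (d : List (String × List String)) :
    ∀ l st s c, (pushLoopB d l st s c).1
      = (l.filter (fun e => (PySem.Dict.mk d).contains e)).reverse ++ st := by
  intro l
  induction l with
  | nil => intro st s c; simp [pushLoopB]
  | cons e es ih =>
    intro st s c
    simp only [pushLoopB]
    by_cases hc : (PySem.Dict.mk d).contains e = false
    · rw [if_pos hc, ih, List.filter_cons_of_neg (by simp [hc])]
    · rw [if_neg hc, ih,
        List.filter_cons_of_pos (by simpa using (eq_true_of_ne_false hc))]
      simp

theorem pushLoopB_cnt (d : List (String × List String)) :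
    ∀ l st s c, (pushLoopB d l st s c).2.2
      = c + ((l.filter (fun e => !(PySem.Dict.mk d).contains e)).length : Int) := by
  intro l
  induction l with
  | nil => intro st s c; simp [pushLoopB]
  | cons e es ih =>
    intro st s c
    simp only [pushLoopB]
    by_cases hc : (PySem.Dict.mk d).contains e = false
    · rw [if_pos hc, ih, List.filter_cons_of_pos (by simp [hc])]
      simp
      omega
    · rw [if_neg hc, ih, List.filter_cons_of_neg (by simpa using (eq_true_of_ne_false hc))]

theorem loopA_spec (d : List (String × List String)) :
    ∀ f l s c, dfsLoopA d f l s c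
      = c + ((l.filter (fun e => !(PySem.Dict.mk d).contains e)).length : Int)
          + ((l.filter (fun e => (PySem.Dict.mk d).contains e)).map
              (fun e => dfsFuelA d f e PySem.Set.empty 0)).sum := by
  intro f l
  induction l with
  | nil => intro s c; simp [dfsLoopA]
  | cons e es ih =>
    intro s c
    simp only [dfsLoopA]
    by_cases hc : (PySem.Dict.mk d).contains e = false
    · rw [if_pos hc, ih, List.filter_cons_of_pos (by simp [hc]),
        List.filter_cons_of_neg (by simp [hc])]
      simp
      omega
    · have hc' : (PySem.Dict.mk d).contains e = true := (eq_true_of_ne_false hc)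
      rw [if_neg hc, ih, List.filter_cons_of_neg (by simp [hc']),
        List.filter_cons_of_pos (by simpa using hc'),
        (addA d f).1 e (PySem.Set.add s e) PySem.Set.empty 0]
      simp
      omega

theorem loopB_spec (d : List (String × List String)) (F : Nat) :
    ∀ g st s c,
      (∀ k ∈ st, okA d F k = true ∧ (PySem.Dict.mk d).contains k = true) →
      (st.map (needA d F)).sum ≤ g →
      loopB d g st s c = c + (st.map (fun k => dfsFuelA d F k PySem.Set.empty 0)).sum := by
  intro g
  induction g with
  | zero =>
    intro st s c hinv hle
    cases st with
    | nil => simp [loopB]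
    | cons k st' =>
      exfalso
      have h1 := (hinv k List.mem_cons_self).1
      cases F with
      | zero => simp [okA] at h1
      | succ F0 =>
        simp only [List.map_cons, List.sum_cons, needA_succ] at hle
        omega
  | succ g ih =>
    intro st s c hinv hle
    cases st with
    | nil => simp [loopB]
    | cons k st' =>
      obtain ⟨hok, hct⟩ := hinv k List.mem_cons_self
      have hget : ∃ l, (PySem.Dict.mk d).get? k = some l := by
        rw [PySem.Dict.contains_eq_isSome_get?] at hct
        exact Option.isSome_iff_exists.1 hct
      obtain ⟨l, hl⟩ := hget
      cases F with
      | zero => simp [okA] at hok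
      | succ F0 =>
        have hsucc : ∀ e ∈ l, okA d F0 e = true := by
          rw [okA_succ, hl] at hok
          simpa [List.all_eq_true] using hok
        have hstep : loopB d (g + 1) (k :: st') s c
            = loopB d g (pushLoopB d l st' s c).1 (pushLoopB d l st' s c).2.1
                (pushLoopB d l st' s c).2.2 := by
          simp only [loopB, hl]
        rw [hstep, pushLoopB_stack, pushLoopB_cnt]
        set FL := l.filter (fun e => (PySem.Dict.mk d).contains e) with hFL
        have hinv' : ∀ k' ∈ FL.reverse ++ st',
            okA d (F0 + 1) k' = true ∧ (PySem.Dict.mk d).contains k' = true := by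
          intro k' hk'
          rcases List.mem_append.1 hk' with h | h
          · have hmem := List.mem_reverse.1 h
            have := List.mem_filter.1 hmem
            exact ⟨okA_mono d F0 k' (hsucc k' this.1), this.2⟩
          · exact hinv k' (List.mem_cons_of_mem _ h)
        have hmapeq : FL.map (needA d (F0 + 1)) = FL.map (needA d F0) :=
          List.map_congr_left fun e he =>
            need_stab d F0 e (hsucc e (List.mem_of_mem_filter he))
        have hneed : needA d (F0 + 1) k = 1 + (FL.map (needA d F0)).sum := by
          simp only [needA_succ, hl, Option.getD_some, hFL]
        have hle' : ((FL.reverse ++ st').map (needA d (F0 + 1))).sum ≤ g := by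
          simp only [List.map_cons, List.sum_cons] at hle
          rw [List.map_append, List.sum_append, List.map_reverse, List.sum_reverse, hmapeq]
          omega
        rw [ih (FL.reverse ++ st') (pushLoopB d l st' s c).2.1 _ hinv' hle']
        have hmapA : FL.map (fun e => dfsFuelA d (F0 + 1) e PySem.Set.empty 0)
            = FL.map (fun e => dfsFuelA d F0 e PySem.Set.empty 0) :=
          List.map_congr_left fun e he =>
            fuelA_ge d (Nat.le_succ F0) e PySem.Set.empty 0
              (hsucc e (List.mem_of_mem_filter he))
        have hAk : dfsFuelA d (F0 + 1) k PySem.Set.empty 0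
            = 0 + ((l.filter (fun e => !(PySem.Dict.mk d).contains e)).length : Int)
              + (FL.map (fun e => dfsFuelA d F0 e PySem.Set.empty 0)).sum := by
          have h1 : dfsFuelA d (F0 + 1) k PySem.Set.empty 0
              = dfsLoopA d F0 l PySem.Set.empty 0 := by
            simp only [dfsFuelA, hl]
          rw [h1, loopA_spec]
        simp only [List.map_cons, List.sum_cons, List.map_append, List.sum_append,
          List.map_reverse, List.sum_reverse, hmapA, hAk]
        omega

-- ===== VERDICT (by name: the statement is the Claim_ definition above) =====
theorem dfs_spec : Claim_equal_dfs := by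
  intro d key seen cnt _ hpre
  obtain ⟨hnd, hpeel⟩ := hpre
  have hok : okA d (d.length + 1) key = true := by
    have := peel_ok d hnd d.length key hpeel
    exact okA_le d (by omega) key this
  have hkeys : key ∈ d.map Prod.fst := peel_sub_keys d d.length key hpeel
  have hct : (PySem.Dict.mk d).contains key = true :=
    (PySem.Dict.contains_iff_mem_keys _ _).2 hkeys
  have hinv : ∀ k ∈ [key], okA d (d.length + 1) k = true ∧
      (PySem.Dict.mk d).contains k = true := by
    intro k hk
    rw [List.mem_singleton.1 hk]
    exact ⟨hok, hct⟩
  have hle : (([key]).map (needA d (d.length + 1))).sum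
      ≤ ((d.map (fun p => p.2.length)).sum + 1) ^ (d.length + 1) := by
    simpa using need_bound d (d.length + 1) key
  unfold Spec_dfs dfs dfs_alt
  rw [loopB_spec d (d.length + 1) _ [key] (PySem.Set.ofList seen) cnt hinv hle,
    (addA d (d.length + 1)).1 key (PySem.Set.ofList seen) PySem.Set.empty cnt]
  simp
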